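-- pv_equiv track=rewrite | github.com/Arcturyus/SimiName | Ngram_letter.py | ngram_letter
-- ===== SOURCE A (Python) =====
-- def ngram_letter(word, n):
--     """
--     Calculate the n-gram frequency of letters in a word.
--     """
--     letter_to_index = {chr(i + ord('a')): i for i in range(26)}
--
--     # Initialize n-gram frequency array
--     ngram_freq = [0] * (26 ** n)
--
--     # Generate n-grams
--     for i in range(len(word) - n + 1):
--         ngram = word[i:i+n]
--         if all(letter in letter_to_index for letter in ngram):
--             index = sum(letter_to_index[letter] * (26 ** (n - j - 1)) for j, letter in enumerate(ngram))
--             ngram_freq[index] += 1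
--
--     return ngram_freq
-- ===== SOURCE B (Python) =====
-- def ngram_letter(word, n):
--     """
--     Calculate the n-gram frequency of letters in a word.
--
--     Single pass: keeps a rolling base-26 index of the current window and a
--     count of non-letter characters in it, instead of recomputing the index
--     (and re-scanning the window) from scratch for every position.
--     """
--     freq = [0] * (26 ** n)
--     L = len(word)
--     if n == 0:
--         freq[0] = L + 1
--         return freq
--     if n > L:
--         return freq
--     vals = [ord(c) - 97 if 'a' <= c <= 'z' else -1 for c in word]
--     hi = 26 ** (n - 1)
--     idx = 0
--     bad = 0
--     for k in range(n):
--         v = vals[k]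
--         if v < 0:
--             bad += 1
--             idx *= 26
--         else:
--             idx = idx * 26 + v
--     if bad == 0:
--         freq[idx] += 1
--     for i in range(1, L - n + 1):
--         out = vals[i - 1]
--         if out < 0:
--             bad -= 1
--         else:
--             idx -= out * hi
--         v = vals[i + n - 1]
--         if v < 0:
--             bad += 1
--             idx *= 26
--         else:
--             idx = idx * 26 + v
--         if bad == 0:
--             freq[idx] += 1
--     return freq
-- ===== Notes on version B (the rewrite author's own statement) =====
-- stated objective: faster
-- what changed: Replaces the per-window recomputation (re-scan the slice for validity, then re-sum letter values times recomputed powers of 26) with a single pass that maintains a rolling base-26 window index plus a count of non-letter characters in the window, updating both in O(1) per shift.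
import Mathlib
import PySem

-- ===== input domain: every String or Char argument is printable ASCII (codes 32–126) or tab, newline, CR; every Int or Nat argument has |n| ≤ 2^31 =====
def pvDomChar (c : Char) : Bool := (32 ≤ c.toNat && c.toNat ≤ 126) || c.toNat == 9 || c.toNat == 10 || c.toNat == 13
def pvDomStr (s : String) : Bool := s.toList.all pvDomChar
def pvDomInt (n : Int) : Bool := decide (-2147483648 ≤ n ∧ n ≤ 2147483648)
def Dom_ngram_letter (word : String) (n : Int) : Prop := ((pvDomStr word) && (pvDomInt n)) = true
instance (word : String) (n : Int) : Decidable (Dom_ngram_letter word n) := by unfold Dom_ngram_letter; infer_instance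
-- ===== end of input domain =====

-- B replaces A's per-window work (slice, validity re-scan, power-sum) with a single pass keeping a
-- rolling base-26 window index and a count of non-letter characters in the window (objective: faster).

-- ===== PORT A =====
-- freq[i] += 1 (shared by both ports; both programs only ever use an in-range index, so the total forms are exact)
def pvBumpAt (l : List Int) (i : Int) : List Int :=
  PySem.List.pySetD l i (PySem.List.pyGetD l i 0 + 1)

-- {chr(i + ord('a')): i for i in range(26)}
def pvLetterToIndex : PySem.Dict Char Int :=
  (PySem.List.pyRange 0 26 1).foldl (fun d i => d.insert (Char.ofNat (i + 97).toNat) i) PySem.Dict.empty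

def ngram_letter (word : String) (n : Int) : List Int :=
  let ngram_freq : List Int := List.replicate ((26 : Int) ^ n.toNat).toNat 0
  (PySem.List.pyRange 0 (PySem.Str.len word - n + 1) 1).foldl
    (fun freq i =>
      let ngram := PySem.List.slice word.toList (some i) (some (i + n))
      if ngram.all (fun letter => pvLetterToIndex.contains letter) then
        -- the guard guarantees every letter is a key, so getD _ 0 is exact here
        pvBumpAt freq ((PySem.List.enumerate ngram).foldl
          (fun s p => s + pvLetterToIndex.getD p.2 0 * (26 : Int) ^ (n - p.1 - 1).toNat) 0)
      else freq)
    ngram_freq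

-- ===== PORT B =====
-- ord(c) - 97 if 'a' <= c <= 'z' else -1
def pvLV (c : Char) : Int :=
  if 97 ≤ c.toNat ∧ c.toNat ≤ 122 then (c.toNat : Int) - 97 else -1

-- seed loop body: grow the rolling index/invalid count by vals[k]
def pvSeedStep (vals : List Int) (p : Int × Int) (k : Int) : Int × Int :=
  let v := PySem.List.pyGetD vals k 0
  if v < 0 then (p.1 * 26, p.2 + 1) else (p.1 * 26 + v, p.2)

-- rolling loop body at window start i: drop vals[i-1], add vals[i+n-1], bump if no invalid char
def pvRollStep (vals : List Int) (n hi : Int) (st : Int × Int × List Int) (i : Int) : Int × Int × List Int :=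
  let outv := PySem.List.pyGetD vals (i - 1) 0
  let p1 : Int × Int := if outv < 0 then (st.1, st.2.1 - 1) else (st.1 - outv * hi, st.2.1)
  let v := PySem.List.pyGetD vals (i + n - 1) 0
  let p2 : Int × Int := if v < 0 then (p1.1 * 26, p1.2 + 1) else (p1.1 * 26 + v, p1.2)
  let fr := if p2.2 = 0 then pvBumpAt st.2.2 p2.1 else st.2.2
  (p2.1, p2.2, fr)

def ngram_letter_alt (word : String) (n : Int) : List Int :=
  let freq : List Int := List.replicate ((26 : Int) ^ n.toNat).toNat 0
  let L : Int := PySem.Str.len word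
  if n = 0 then PySem.List.pySetD freq 0 (L + 1)
  else if n > L then freq
  else
    let vals : List Int := word.toList.map pvLV
    let hi : Int := (26 : Int) ^ (n - 1).toNat
    let seed : Int × Int := (PySem.List.pyRange 0 n 1).foldl (pvSeedStep vals) (0, 0)
    let freq1 := if seed.2 = 0 then pvBumpAt freq seed.1 else freq
    let fin : Int × Int × List Int :=
      (PySem.List.pyRange 1 (L - n + 1) 1).foldl (pvRollStep vals n hi) (seed.1, seed.2, freq1)
    fin.2.2

-- ===== PRECONDITION & SPEC =====
-- A raises TypeError when n < 0 (26 ** n is a float, so [0] * (26 ** n) fails) and MemoryError /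
-- OverflowError when n ≥ 7 (allocating the 26 ** n zeros exceeds memory / index range); B raises there too.
def Pre_ngram_letter (word : String) (n : Int) : Prop := 0 ≤ n ∧ n ≤ 6
instance (word : String) (n : Int) : Decidable (Pre_ngram_letter word n) := by unfold Pre_ngram_letter; infer_instance
def pvWitness_ngram_letter : String × Int := ("aba!b", 2)

def Spec_ngram_letter (word : String) (n : Int) (out : List Int) : Prop := out = ngram_letter_alt word n
instance (word : String) (n : Int) (out : List Int) : Decidable (Spec_ngram_letter word n out) := by unfold Spec_ngram_letter; infer_instance

-- ===== CLAIM (what is proved, stated in full; the proofs are below) =====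
def Claim_equal_ngram_letter : Prop := ∀ (word : String) (n : Int), Dom_ngram_letter word n → Pre_ngram_letter word n → Spec_ngram_letter word n (ngram_letter word n)

-- ===== LEMMAS AND PROOFS =====

-- value of an invalid letter clamped to 0 (its contribution to the rolling index)
def pvF0 (v : Int) : Int := if v < 0 then 0 else v

-- base-26 Horner value of a window of letter values (invalid ones contribute 0)
def pvHidx (w : List Int) : Int := w.foldl (fun a v => a * 26 + pvF0 v) 0

-- the common reference loop both ports are reduced to: for each window start i,
-- bump the window's index iff the window contains no invalid value
def pvSpecStep (vs : List Int) (n' : Nat) (freq : List Int) (i : Nat) : List Int :=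
  if ((vs.drop i).take n').all (fun v => decide (0 ≤ v)) then
    pvBumpAt freq (pvHidx ((vs.drop i).take n'))
  else freq

def pvSpecFold (vs : List Int) (n' : Nat) (m : Nat) (fr : List Int) : List Int :=
  (List.range m).foldl (pvSpecStep vs n') fr

theorem pv_charBeq (a b : Char) : (a == b) = (a.toNat == b.toNat) := by
  by_cases h : a = b
  · subst h; simp
  · have hn : a.toNat ≠ b.toNat := fun hn => h (by rw [← Char.ofNat_toNat a, hn, Char.ofNat_toNat])
    simp [h, hn]

theorem pv_dict_get (c : Char) :
    pvLetterToIndex.get? c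
      = if 97 ≤ c.toNat ∧ c.toNat ≤ 122 then some ((c.toNat : Int) - 97) else none := by
  have hd : pvLetterToIndex = PySem.Dict.mk [('a',0),('b',1),('c',2),('d',3),('e',4),('f',5),('g',6),('h',7),('i',8),('j',9),('k',10),('l',11),('m',12),('n',13),('o',14),('p',15),('q',16),('r',17),('s',18),('t',19),('u',20),('v',21),('w',22),('x',23),('y',24),('z',25)] := by decide
  rw [hd]
  simp only [PySem.Dict.get?_mk_cons, pv_charBeq]
  by_cases h : 97 ≤ c.toNat ∧ c.toNat ≤ 122
  · obtain ⟨h1, h2⟩ := h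
    rw [← Char.ofNat_toNat c]
    generalize c.toNat = m at *
    interval_cases m <;> simp
  · rw [if_neg h]
    have hne : ∀ k : Nat, 97 ≤ k → k ≤ 122 → (k == c.toNat) = false := by
      intro k hk1 hk2; simp only [beq_eq_false_iff_ne]; omega
    simp [hne, PySem.Dict.get?]

theorem pv_dict_contains (c : Char) :
    pvLetterToIndex.contains c = decide (0 ≤ pvLV c) := by
  rw [PySem.Dict.contains_eq_isSome_get?, pv_dict_get, pvLV]
  by_cases h : 97 ≤ c.toNat ∧ c.toNat ≤ 122 <;> simp [h]

theorem pv_dict_getD (c : Char) (h : 0 ≤ pvLV c) :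
    pvLetterToIndex.getD c 0 = pvLV c := by
  rw [PySem.Dict.getD_eq_get?_getD, pv_dict_get, pvLV]
  by_cases hc : 97 ≤ c.toNat ∧ c.toNat ≤ 122
  · simp [hc]
  · exfalso; simp [pvLV, hc] at h

theorem pv_hidx_shift (w : List Int) (a : Int) :
    w.foldl (fun a v => a * 26 + pvF0 v) a = a * 26 ^ w.length + pvHidx w := by
  induction w generalizing a with
  | nil => simp [pvHidx]
  | cons v w ih =>
      simp only [List.foldl_cons, List.length_cons, pvHidx]
      rw [ih, ih (0 * 26 + pvF0 v)]
      ring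

theorem pv_hidx_cons (v : Int) (w : List Int) :
    pvHidx (v :: w) = pvF0 v * 26 ^ w.length + pvHidx w := by
  show (v :: w).foldl (fun a v => a * 26 + pvF0 v) 0 = _
  rw [List.foldl_cons, pv_hidx_shift]
  ring_nf

theorem pv_hidx_append (w : List Int) (x : Int) :
    pvHidx (w ++ [x]) = pvHidx w * 26 + pvF0 x := by
  simp [pvHidx, List.foldl_append]

theorem pv_bump_single (x : Int) : pvBumpAt [x] 0 = [x + 1] := by
  simp [pvBumpAt, PySem.List.pyGetD_zero_cons, PySem.List.pySetD_of_nonneg]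

theorem pv_sumA (w : List Char) (s a n : Int)
    (hall : ∀ c ∈ w, 0 ≤ pvLV c) (hn : n = s + w.length) :
    (PySem.List.enumerate w s).foldl
        (fun t p => t + pvLetterToIndex.getD p.2 0 * (26 : Int) ^ (n - p.1 - 1).toNat) a
      = a + pvHidx (w.map pvLV) := by
  induction w generalizing s a with
  | nil => simp [pvHidx]
  | cons c w ih =>
      rw [PySem.List.enumerate_cons, List.foldl_cons]
      rw [ih (s + 1) _ (fun c hc => hall c (List.mem_cons_of_mem _ hc))
            (by simp at hn ⊢; omega)]
      have hc0 : 0 ≤ pvLV c := hall c List.mem_cons_self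
      rw [pv_dict_getD c hc0]
      simp only [List.map_cons]
      rw [pv_hidx_cons]
      have he : (n - s - 1).toNat = w.length := by simp at hn; omega
      rw [he]
      have hf : pvF0 (pvLV c) = pvLV c := by simp [pvF0]; omega
      rw [hf, List.length_map]
      ring

theorem pv_countP_all (w : List Int) :
    (w.countP (fun v => decide (v < 0)) = 0) ↔ (w.all (fun v => decide (0 ≤ v)) = true) := by
  rw [List.countP_eq_zero, List.all_eq_true]
  constructor <;> intro h v hv <;> have := h v hv <;> simp at * <;> omega

-- ===== A reduces to the reference loop =====
theorem pv_A_main (word : String) (n : Int) (hn : 0 ≤ n) :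
    ngram_letter word n
      = pvSpecFold (word.toList.map pvLV) n.toNat
          ((↑word.toList.length - n + 1).toNat)
          (List.replicate ((26 : Int) ^ n.toNat).toNat 0) := by
  unfold ngram_letter pvSpecFold
  rw [PySem.Str.len_eq, PySem.List.pyRange_one, List.foldl_map]
  simp only [sub_zero, zero_add]
  apply PySem.List.foldl_congr_mem
  intro freq k hk
  simp only [List.mem_range] at hk
  have hkle : (k : Int) + n ≤ word.toList.length := by omega
  have hslice : PySem.List.slice word.toList (some (k : Int)) (some ((k : Int) + n))
      = (word.toList.drop k).take n.toNat := by
    rw [show ((k : Int) + n) = ((k : Int) + (n.toNat : Int)) by omega]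
    exact PySem.List.slice_natCast_add word.toList k n.toNat
  rw [hslice]
  have hlen : ((word.toList.drop k).take n.toNat).length = n.toNat := by
    simp only [List.length_take, List.length_drop]; omega
  have hguard : ((word.toList.drop k).take n.toNat).all (fun letter => pvLetterToIndex.contains letter)
      = (((word.toList.drop k).take n.toNat).map pvLV).all (fun v => decide (0 ≤ v)) := by
    rw [List.all_map]
    have : (fun letter => pvLetterToIndex.contains letter)
        = ((fun v => decide (0 ≤ v)) ∘ pvLV) := funext pv_dict_contains
    rw [this]
  rw [pvSpecStep, ← List.map_drop, ← List.map_take, ← hguard]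
  by_cases hg : ((word.toList.drop k).take n.toNat).all (fun letter => pvLetterToIndex.contains letter) = true
  · rw [if_pos hg, if_pos hg]
    have hall : ∀ c ∈ (word.toList.drop k).take n.toNat, 0 ≤ pvLV c := by
      intro c hc
      have := (List.all_eq_true.mp hg) c hc
      rw [pv_dict_contains] at this
      simpa using this
    rw [pv_sumA _ 0 0 n hall (by rw [hlen]; omega), zero_add]
  · rw [if_neg hg, if_neg hg]

-- ===== B reduces to the reference loop =====
theorem pv_spec_n0 (vs : List Int) (m : Nat) (c : Int) :
    pvSpecFold vs 0 m [c] = [c + m] := by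
  induction m with
  | zero => simp [pvSpecFold]
  | succ m ih =>
      unfold pvSpecFold at ih ⊢
      rw [List.range_succ, List.foldl_append, ih]
      simp only [List.foldl_cons, List.foldl_nil, pvSpecStep, List.take_zero, List.all_nil,
        if_true]
      rw [show pvHidx [] = 0 from rfl, pv_bump_single _]
      push_cast; ring_nf

theorem pv_seed (vs : List Int) (m : Nat) (hm : m ≤ vs.length) :
    (PySem.List.pyRange 0 (m : Int) 1).foldl (pvSeedStep vs) (0, 0)
      = (pvHidx (vs.take m), ((vs.take m).countP (fun v => decide (v < 0)) : Int)) := by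
  induction m with
  | zero => simp [PySem.List.pyRange_one_eq_nil, pvHidx]
  | succ m ih =>
      have hmlt : m < vs.length := by omega
      rw [show ((m + 1 : Nat) : Int) = (m : Int) + 1 by push_cast; ring,
          PySem.List.pyRange_one_succ_right (by omega), List.foldl_append,
          ih (by omega)]
      simp only [List.foldl_cons, List.foldl_nil, pvSeedStep]
      rw [show PySem.List.pyGetD vs (m : Int) 0 = vs[m] by
        rw [PySem.List.pyGetD_natCast]; exact List.getD_eq_getElem vs 0 hmlt]
      have htake : vs.take (m + 1) = vs.take m ++ [vs[m]] := by
        rw [List.take_add_one, List.getElem?_eq_getElem hmlt]; rfl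
      rw [htake, pv_hidx_append, List.countP_append]
      by_cases hv : vs[m] < 0 <;> simp [hv, pvF0]

theorem pv_win_cons (vs : List Int) (n' t : Nat) (h1 : 1 ≤ n') (h2 : t + n' ≤ vs.length) :
    (vs.drop t).take n' = vs[t]'(by omega) :: ((vs.drop (t + 1)).take (n' - 1)) := by
  obtain ⟨k, rfl⟩ : ∃ k, n' = k + 1 := ⟨n' - 1, by omega⟩
  rw [List.drop_eq_getElem_cons (by omega), List.take_succ_cons]
  simp

theorem pv_win_snoc (vs : List Int) (n' t : Nat) (h1 : 1 ≤ n') (h2 : t + n' < vs.length) :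
    (vs.drop (t + 1)).take n'
      = ((vs.drop (t + 1)).take (n' - 1)) ++ [vs[t + n']'(by omega)] := by
  obtain ⟨k, rfl⟩ : ∃ k, n' = k + 1 := ⟨n' - 1, by omega⟩
  have hk : k < ((vs.drop (t + 1)).length) := by
    simp only [List.length_drop]; omega
  rw [List.take_add_one, List.getElem?_eq_getElem hk]
  simp only [List.getElem_drop, Option.toList_some]
  have he : t + 1 + k = t + (k + 1) := by omega
  simp [he]

theorem pv_win_len (vs : List Int) (n' t : Nat) (h : t + n' ≤ vs.length) :
    ((vs.drop t).take n').length = n' := by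
  simp; omega

theorem pv_roll_step (vs : List Int) (n' t : Nat) (hn1 : 1 ≤ n') (hlt : t + n' < vs.length) (fr : List Int) :
    pvRollStep vs (n' : Int) ((26 : Int) ^ (n' - 1))
        (pvHidx ((vs.drop t).take n'),
          (((vs.drop t).take n').countP (fun v => decide (v < 0)) : Int), fr)
        ((t : Int) + 1)
      = (pvHidx ((vs.drop (t + 1)).take n'),
          (((vs.drop (t + 1)).take n').countP (fun v => decide (v < 0)) : Int),
          pvSpecStep vs n' fr (t + 1)) := by
  unfold pvRollStep
  rw [show ((t : Int) + 1 - 1) = ((t : Nat) : Int) by ring]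
  rw [show PySem.List.pyGetD vs ((t : Nat) : Int) 0 = vs[t]'(by omega) by
    rw [PySem.List.pyGetD_natCast]; exact List.getD_eq_getElem vs 0 (by omega)]
  rw [show ((t : Int) + 1 + (n' : Int) - 1) = ((t + n' : Nat) : Int) by push_cast; ring]
  rw [show PySem.List.pyGetD vs ((t + n' : Nat) : Int) 0 = vs[t + n']'(by omega) by
    rw [PySem.List.pyGetD_natCast]; exact List.getD_eq_getElem vs 0 (by omega)]
  have hwc := pv_win_cons vs n' t hn1 (by omega)
  have hws := pv_win_snoc vs n' t hn1 hlt
  have hmidlen : ((vs.drop (t + 1)).take (n' - 1)).length = n' - 1 := by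
    apply pv_win_len; omega
  rw [hwc, hws, pv_hidx_cons, hmidlen, pv_hidx_append, List.countP_cons, List.countP_append]
  rw [pvSpecStep, hws]
  by_cases h1 : vs[t] < 0 <;> by_cases h2 : vs[t + n'] < 0 <;>
    simp [h1, h2, pvF0, List.all_append, Prod.ext_iff] <;>
    first
      | rw [if_neg (show ¬((↑(List.countP (fun v => decide (v < 0))
              (List.take (n' - 1) (List.drop (t + 1) vs))) : Int) + 1 = 0) by omega),
            if_neg (fun hc => absurd hc.2 (by omega))]
      | simp [pv_hidx_append, pvF0, h2, not_lt.1 h2]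

theorem pv_roll (vs : List Int) (n' : Nat) (hn1 : 1 ≤ n') (hle : n' ≤ vs.length)
    (fr0 : List Int) (t : Nat) (ht : t ≤ vs.length - n') :
    (PySem.List.pyRange 1 (1 + (t : Int)) 1).foldl
        (pvRollStep vs (n' : Int) ((26 : Int) ^ (n' - 1)))
        (pvHidx (vs.take n'), ((vs.take n').countP (fun v => decide (v < 0)) : Int),
          pvSpecFold vs n' 1 fr0)
      = (pvHidx ((vs.drop t).take n'),
          (((vs.drop t).take n').countP (fun v => decide (v < 0)) : Int),
          pvSpecFold vs n' (t + 1) fr0) := by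
  induction t with
  | zero => simp [PySem.List.pyRange_one_eq_nil]
  | succ t ih =>
      rw [show (1 + ((t + 1 : Nat) : Int)) = (1 + (t : Int)) + 1 by push_cast; ring,
          PySem.List.pyRange_one_succ_right (by omega), List.foldl_append, ih (by omega)]
      simp only [List.foldl_cons, List.foldl_nil]
      rw [show (1 + (t : Int)) = ((t : Int) + 1) by ring,
          pv_roll_step vs n' t hn1 (by omega)]
      have hstep : pvSpecFold vs n' (t + 1 + 1) fr0
          = pvSpecStep vs n' (pvSpecFold vs n' (t + 1) fr0) (t + 1) := by
        unfold pvSpecFold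
        rw [List.range_succ, List.foldl_append]
        simp
      rw [hstep]

theorem pv_B_main (word : String) (n : Int) (hn : 0 ≤ n) :
    ngram_letter_alt word n
      = pvSpecFold (word.toList.map pvLV) n.toNat
          ((↑word.toList.length - n + 1).toNat)
          (List.replicate ((26 : Int) ^ n.toNat).toNat 0) := by
  obtain ⟨m, rfl⟩ : ∃ m : Nat, n = (m : Int) := ⟨n.toNat, (Int.toNat_of_nonneg hn).symm⟩
  unfold ngram_letter_alt
  rw [PySem.Str.len_eq]
  simp only [Int.toNat_natCast]
  by_cases h0 : (m : Int) = 0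
  · rw [if_pos h0]
    obtain rfl : m = 0 := by omega
    have hrep : List.replicate ((26 : Int) ^ 0).toNat (0 : Int) = [(0 : Int)] := rfl
    rw [hrep, pv_spec_n0]
    simp [PySem.List.pySetD_of_nonneg]
  · rw [if_neg h0]
    by_cases h1 : (m : Int) > (word.toList.length : Int)
    · rw [if_pos h1]
      have hz : ((word.toList.length : Int) - (m : Int) + 1).toNat = 0 := by omega
      rw [hz]
      simp [pvSpecFold]
    · rw [if_neg h1]
      have hn1 : 1 ≤ m := by omega
      have hlen : (word.toList.map pvLV).length = word.toList.length := by simp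
      have hle : m ≤ (word.toList.map pvLV).length := by rw [hlen]; omega
      rw [pv_seed (word.toList.map pvLV) m hle]
      have hhi : (((m : Int) - 1).toNat) = m - 1 := by omega
      rw [hhi]
      have hfr1 : (if ((((word.toList.map pvLV).take m).countP
                (fun v => decide (v < 0)) : Int)) = 0 then
              pvBumpAt (List.replicate ((26 : Int) ^ m).toNat 0)
                (pvHidx ((word.toList.map pvLV).take m))
            else List.replicate ((26 : Int) ^ m).toNat 0)
          = pvSpecFold (word.toList.map pvLV) m 1
              (List.replicate ((26 : Int) ^ m).toNat 0) := by
        unfold pvSpecFold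
        rw [show List.range 1 = [0] from rfl]
        simp only [List.foldl_cons, List.foldl_nil, pvSpecStep, List.drop_zero]
        by_cases hg : (((word.toList.map pvLV).take m).all (fun v => decide (0 ≤ v))) = true
        · rw [if_pos (show ((((word.toList.map pvLV).take m).countP
                (fun v => decide (v < 0)) : Int)) = 0 by
              exact_mod_cast (pv_countP_all _).mpr hg), if_pos hg]
        · rw [if_neg (fun hc => hg ((pv_countP_all _).mp (by exact_mod_cast hc))), if_neg hg]
      rw [hfr1]
      rw [show ((word.toList.length : Int) - (m : Int) + 1)
            = 1 + ((word.toList.length - m : Nat) : Int) by omega]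
      rw [pv_roll (word.toList.map pvLV) m hn1 hle _ (word.toList.length - m)
            (by rw [hlen])]
      show pvSpecFold (word.toList.map pvLV) m (word.toList.length - m + 1)
            (List.replicate ((26 : Int) ^ m).toNat 0)
          = pvSpecFold (word.toList.map pvLV) m
              ((1 + ((word.toList.length - m : Nat) : Int)).toNat)
              (List.replicate ((26 : Int) ^ m).toNat 0)
      rw [show ((1 : Int) + ((word.toList.length - m : Nat) : Int)).toNat
            = word.toList.length - m + 1 by omega]

-- ===== VERDICT (by name: the statement is the Claim_ definition above) =====
theorem ngram_letter_spec : Claim_equal_ngram_letter := by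
  intro word n _ hpre
  unfold Spec_ngram_letter
  rw [pv_A_main word n hpre.1, pv_B_main word n hpre.1]
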